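-- pv_equiv track=rewrite | github.com/Matteo-Candi/Master-Thesis | benchmark/Python_formatted.py | even_decimal_value
-- ===== SOURCE A (Python) =====
-- def even_decimal_value(s, n):
--     result = 0
--     for i in range(n):
--         for j in range(i, n):
--             decimal_value = 0
--             power_of_2 = 1
--             for k in range(i, j + 1):
--                 decimal_value += (ord(s[k]) - ord('0')) * power_of_2
--                 power_of_2 *= 2
--             if decimal_value % 2 == 0:
--                 result += 1
--     return result
-- ===== SOURCE B (Python) =====
-- def even_decimal_value(s, n):
--     # The inner value i..j is even iff its least-significant digit s[i] is even,
--     # and each even position i contributes one count per j in [i, n): that is n - i.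
--     return sum(n - i for i in range(n) if (ord(s[i]) - 48) % 2 == 0)
-- ===== Notes on version B (the rewrite author's own statement) =====
-- stated objective: faster
-- what changed: Replaced the O(n^3) enumeration of all substrings (recomputing each decimal value) with a single pass: a substring's value is even iff its least-significant digit s[i] is even, so each even position i contributes n-i.
import Mathlib
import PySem

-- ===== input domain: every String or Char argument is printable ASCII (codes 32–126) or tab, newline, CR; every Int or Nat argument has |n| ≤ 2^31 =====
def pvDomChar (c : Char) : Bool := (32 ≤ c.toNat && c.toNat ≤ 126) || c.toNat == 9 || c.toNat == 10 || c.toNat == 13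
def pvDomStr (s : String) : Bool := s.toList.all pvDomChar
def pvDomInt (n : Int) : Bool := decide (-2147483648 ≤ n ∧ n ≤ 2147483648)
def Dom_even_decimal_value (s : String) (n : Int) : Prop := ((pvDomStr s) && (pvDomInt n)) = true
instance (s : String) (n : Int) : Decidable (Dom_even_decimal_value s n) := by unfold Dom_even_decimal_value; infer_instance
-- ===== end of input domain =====

-- B replaces A's O(n^3) all-substrings enumeration by a single pass using the fact
-- that the little-endian value of s[i..j] is even iff digit s[i] is even (measured faster).

-- ord(s[k]) : the character code at index k; pyGet? is none exactly where Python raises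
-- IndexError, which Pre_ excludes, so the '0' default is never reached inside Pre_.
def pvOrdAt (s : String) (k : Int) : Int := (((PySem.Str.pyGet? s k).getD '0').toNat : Int)

-- ===== PORT A =====
def even_decimal_value (s : String) (n : Int) : Int :=
  (PySem.List.pyRange 0 n 1).foldl (fun result i =>
    (PySem.List.pyRange i n 1).foldl (fun result j =>
      -- decimal_value, power_of_2 loop over k in range(i, j+1); then the parity test
      if PySem.Int.mod ((PySem.List.pyRange i (j + 1) 1).foldl
        (fun (st : Int × Int) k => (st.1 + (pvOrdAt s k - 48) * st.2, st.2 * 2)) (0, 1)).1 2 == 0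
      then result + 1 else result) result) 0

-- ===== PORT B =====
def even_decimal_value_alt (s : String) (n : Int) : Int :=
  (((PySem.List.pyRange 0 n 1).filter
      (fun i => PySem.Int.mod (pvOrdAt s i - 48) 2 == 0)).map (fun i => n - i)).sum

-- ===== PRECONDITION & SPEC =====
-- Pre_ excludes exactly the inputs where Python A raises IndexError: n beyond the length of s.
def Pre_even_decimal_value (s : String) (n : Int) : Prop := n ≤ PySem.Str.len s
instance (s : String) (n : Int) : Decidable (Pre_even_decimal_value s n) := by
  unfold Pre_even_decimal_value; infer_instance

def pvWitness_even_decimal_value : String × Int := ("10110", 5)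

def Spec_even_decimal_value (s : String) (n : Int) (out : Int) : Prop := out = even_decimal_value_alt s n
instance (s : String) (n : Int) (out : Int) : Decidable (Spec_even_decimal_value s n out) := by
  unfold Spec_even_decimal_value; infer_instance

-- ===== CLAIM (what is proved, stated in full; the proofs are below) =====
def Claim_equal_even_decimal_value : Prop := ∀ (s : String) (n : Int), Dom_even_decimal_value s n → Pre_even_decimal_value s n → Spec_even_decimal_value s n (even_decimal_value s n)

-- ===== LEMMAS AND PROOFS =====

-- the (decimal_value, power_of_2) accumulator: once power_of_2 is even, every later
-- addition is even, so decimal_value's parity is frozen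
lemma pv_parity_frozen (s : String) (l : List Int) :
    ∀ (dv pw : Int), 2 ∣ pw →
      ((l.foldl (fun (st : Int × Int) k => (st.1 + (pvOrdAt s k - 48) * st.2, st.2 * 2)) (dv, pw)).1) % 2
        = dv % 2 := by
  induction l with
  | nil => intro dv pw _; simp
  | cons a t ih =>
    intro dv pw hpw
    obtain ⟨c, rfl⟩ := hpw
    simp only [List.foldl_cons]
    rw [ih _ _ ⟨c * 2, by ring⟩,
      show dv + (pvOrdAt s a - 48) * (2 * c) = dv + 2 * ((pvOrdAt s a - 48) * c) from by ring,
      Int.add_mul_emod_self_left]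

-- a 0-or-f(i) sum over a list is the filtered sum (B's comprehension shape)
lemma pv_sum_ite (p : Int → Bool) (f : Int → Int) (l : List Int) :
    (l.map (fun i => if p i then f i else 0)).sum = ((l.filter p).map f).sum := by
  induction l with
  | nil => rfl
  | cons a t ih => by_cases h : p a <;> simp [h, ih]

-- the inner k-loop over a nonempty range i..j has parity of the first digit
lemma pv_inner_parity (s : String) (i j : Int) (hij : i ≤ j) :
    (((PySem.List.pyRange i (j + 1) 1).foldl
        (fun (st : Int × Int) k => (st.1 + (pvOrdAt s k - 48) * st.2, st.2 * 2)) (0, 1)).1) % 2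
      = (pvOrdAt s i - 48) % 2 := by
  rw [PySem.List.pyRange_one_cons (by omega : i < j + 1)]
  simp only [List.foldl_cons, zero_add, mul_one, one_mul]
  exact pv_parity_frozen s _ _ 2 ⟨1, rfl⟩

-- ===== VERDICT (by name: the statement is the Claim_ definition above) =====
theorem even_decimal_value_spec : Claim_equal_even_decimal_value := by
  intro s n _ _
  unfold Spec_even_decimal_value even_decimal_value even_decimal_value_alt
  -- A's middle j-loop adds 1 per j in [i, n) iff digit i is even, i.e. (n - i) in total
  have hmid : ∀ (result i : Int), i ∈ PySem.List.pyRange 0 n 1 →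
      (fun (result i : Int) =>
        (PySem.List.pyRange i n 1).foldl (fun result j =>
          if PySem.Int.mod ((PySem.List.pyRange i (j + 1) 1).foldl
            (fun (st : Int × Int) k => (st.1 + (pvOrdAt s k - 48) * st.2, st.2 * 2)) (0, 1)).1 2 == 0
          then result + 1 else result) result) result i
    = (fun (result i : Int) =>
        result + (if PySem.Int.mod (pvOrdAt s i - 48) 2 == 0 then n - i else 0)) result i := by
    intro result i hi
    have hi' := PySem.List.mem_pyRange_one.mp hi
    simp only []
    have hcong : ∀ (r j : Int), j ∈ PySem.List.pyRange i n 1 →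
        (fun (r j : Int) =>
          if PySem.Int.mod ((PySem.List.pyRange i (j + 1) 1).foldl
            (fun (st : Int × Int) k => (st.1 + (pvOrdAt s k - 48) * st.2, st.2 * 2)) (0, 1)).1 2 == 0
          then r + 1 else r) r j
      = (fun (r _j : Int) =>
          r + (if PySem.Int.mod (pvOrdAt s i - 48) 2 == 0 then 1 else 0)) r j := by
      intro r j hj
      have hj' := PySem.List.mem_pyRange_one.mp hj
      simp only []
      have hm : PySem.Int.mod ((PySem.List.pyRange i (j + 1) 1).foldl
            (fun (st : Int × Int) k => (st.1 + (pvOrdAt s k - 48) * st.2, st.2 * 2)) (0, 1)).1 2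
          = PySem.Int.mod (pvOrdAt s i - 48) 2 := by
        rw [PySem.Int.mod_eq_emod_of_pos (by norm_num : (0:Int) < 2),
          PySem.Int.mod_eq_emod_of_pos (by norm_num : (0:Int) < 2), pv_inner_parity s i j hj'.1]
      rw [hm]
      split_ifs <;> omega
    rw [PySem.List.foldl_congr_mem _ _ _ _ hcong, PySem.List.foldl_add]
    by_cases h : PySem.Int.mod (pvOrdAt s i - 48) 2 == 0
    · simp only [if_pos h]
      rw [PySem.List.sum_map_const_int, PySem.List.length_pyRange_one]
      omega
    · simp only [if_neg h]
      simp
  rw [PySem.List.foldl_congr_mem _ _ _ _ hmid, PySem.List.foldl_add]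
  simp only [zero_add]
  -- summing the if-expression over the range is exactly B's filtered sum
  exact pv_sum_ite _ _ _
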